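-- pv_equiv track=rewrite | github.com/TheBroOfCookies/Advent_of_code-2023 | Day_22/Day_22.py | intersect_range
-- ===== SOURCE A (Python) =====
-- def intersect_range(b1, b2):
--     s1, e1 = b1
--     s2, e2 = b2
--     for x in range(max(s1[0], s2[0]), min(e1[0], e2[0])+1):
--         for y in range(max(s1[1], s2[1]), min(e1[1], e2[1])+1):
--             for z in range(max(s1[2], s2[2]), min(e1[2], e2[2])+1):
--                 return True
--     return False
-- ===== SOURCE B (Python) =====
-- def intersect_range(b1, b2):
--     (s1, e1), (s2, e2) = b1, b2
--     return all(max(s1[i], s2[i]) <= min(e1[i], e2[i]) for i in range(3))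
-- ===== Notes on version B (the rewrite author's own statement) =====
-- stated objective: simpler
-- what changed: Replaces the triple nested range-iteration early-return loop with the closed-form per-axis overlap test max(start) <= min(end) conjoined over the three axes.
import Mathlib
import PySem

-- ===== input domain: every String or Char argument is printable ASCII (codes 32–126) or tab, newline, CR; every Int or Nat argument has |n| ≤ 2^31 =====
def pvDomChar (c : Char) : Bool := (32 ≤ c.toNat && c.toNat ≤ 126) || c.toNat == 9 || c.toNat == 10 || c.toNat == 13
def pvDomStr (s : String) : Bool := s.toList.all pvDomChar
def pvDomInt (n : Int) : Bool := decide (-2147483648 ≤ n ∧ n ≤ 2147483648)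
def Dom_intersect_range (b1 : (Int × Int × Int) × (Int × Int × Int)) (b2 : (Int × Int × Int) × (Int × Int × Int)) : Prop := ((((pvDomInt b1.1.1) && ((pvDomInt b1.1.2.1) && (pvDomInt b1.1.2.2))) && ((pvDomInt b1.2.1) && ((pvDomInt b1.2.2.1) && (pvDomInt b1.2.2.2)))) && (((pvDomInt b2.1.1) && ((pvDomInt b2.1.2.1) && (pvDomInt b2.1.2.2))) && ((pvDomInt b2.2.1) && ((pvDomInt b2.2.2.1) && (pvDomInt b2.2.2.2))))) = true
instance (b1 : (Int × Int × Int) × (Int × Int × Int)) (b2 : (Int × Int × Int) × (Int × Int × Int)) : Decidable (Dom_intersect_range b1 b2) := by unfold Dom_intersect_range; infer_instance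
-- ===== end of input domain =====

-- B replaces A's triple nested range loop with the closed-form per-axis overlap test (simpler, loop-free).
-- ===== PORT A =====
-- early-return loop helpers: for z / for y / for x with 'return True' propagated as Option
def pvLoopZ : List Int → Option Bool
  | [] => none
  | _ :: _ => some true

def pvLoopY (zlo zhi : Int) : List Int → Option Bool
  | [] => none
  | _ :: ys =>
    match pvLoopZ (PySem.List.pyRange zlo zhi 1) with
    | some r => some r
    | none => pvLoopY zlo zhi ys

def pvLoopX (ylo yhi zlo zhi : Int) : List Int → Option Bool
  | [] => none
  | _ :: xs =>
    match pvLoopY zlo zhi (PySem.List.pyRange ylo yhi 1) with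
    | some r => some r
    | none => pvLoopX ylo yhi zlo zhi xs

def intersect_range (b1 : (Int × Int × Int) × (Int × Int × Int)) (b2 : (Int × Int × Int) × (Int × Int × Int)) : Bool :=
  -- s1, e1 = b1 ; s2, e2 = b2 are inlined as projections
  match pvLoopX (max b1.1.2.1 b2.1.2.1) (min b1.2.2.1 b2.2.2.1 + 1)
        (max b1.1.2.2 b2.1.2.2) (min b1.2.2.2 b2.2.2.2 + 1)
        (PySem.List.pyRange (max b1.1.1 b2.1.1) (min b1.2.1 b2.2.1 + 1) 1) with
  | some r => r
  | none => false


-- ===== PORT B =====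
def intersect_range_alt (b1 : (Int × Int × Int) × (Int × Int × Int)) (b2 : (Int × Int × Int) × (Int × Int × Int)) : Bool :=
  decide (max b1.1.1 b2.1.1 ≤ min b1.2.1 b2.2.1) &&
  decide (max b1.1.2.1 b2.1.2.1 ≤ min b1.2.2.1 b2.2.2.1) &&
  decide (max b1.1.2.2 b2.1.2.2 ≤ min b1.2.2.2 b2.2.2.2)


-- ===== PRECONDITION & SPEC =====
def Spec_intersect_range (b1 : (Int × Int × Int) × (Int × Int × Int)) (b2 : (Int × Int × Int) × (Int × Int × Int)) (out : Bool) : Prop := out = intersect_range_alt b1 b2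
instance (b1 : (Int × Int × Int) × (Int × Int × Int)) (b2 : (Int × Int × Int) × (Int × Int × Int)) (out : Bool) : Decidable (Spec_intersect_range b1 b2 out) := by unfold Spec_intersect_range; infer_instance

-- ===== CLAIM (what is proved, stated in full; the proofs are below) =====
def Claim_equal_intersect_range : Prop := ∀ (b1 : (Int × Int × Int) × (Int × Int × Int)) (b2 : (Int × Int × Int) × (Int × Int × Int)), Dom_intersect_range b1 b2 → Spec_intersect_range b1 b2 (intersect_range b1 b2)

-- ===== LEMMAS AND PROOFS =====
theorem pvLoopZ_eq (a b : Int) :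
    pvLoopZ (PySem.List.pyRange a b 1) = if a < b then some true else none := by
  rcases lt_or_ge a b with h | h
  · rw [PySem.List.pyRange_one_cons h]; simp [pvLoopZ, h]
  · have : PySem.List.pyRange a b 1 = [] := by
      simp [PySem.List.pyRange_one]
      omega
    rw [this]; simp [pvLoopZ]
    omega

theorem pvLoopY_eq (zlo zhi : Int) (ys : List Int) :
    pvLoopY zlo zhi ys = if ys ≠ [] ∧ zlo < zhi then some true else none := by
  induction ys with
  | nil => simp [pvLoopY]
  | cons y ys ih =>
    simp only [pvLoopY, pvLoopZ_eq]
    by_cases h : zlo < zhi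
    · simp [h]
    · simp [h, ih]

theorem pvLoopX_eq (ylo yhi zlo zhi : Int) (xs : List Int) :
    pvLoopX ylo yhi zlo zhi xs =
      if xs ≠ [] ∧ ylo < yhi ∧ zlo < zhi then some true else none := by
  induction xs with
  | nil => simp [pvLoopX]
  | cons x xs ih =>
    simp only [pvLoopX, pvLoopY_eq]
    by_cases hy : ylo < yhi
    · by_cases hz : zlo < zhi
      · simp [hy, hz, PySem.List.pyRange_one_cons hy]
      · simp [hy, hz, ih]
    · have : PySem.List.pyRange ylo yhi 1 = [] := by
        simp [PySem.List.pyRange_one]; omega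
      simp [this, hy, ih]

-- ===== VERDICT (by name: the statement is the Claim_ definition above) =====
theorem intersect_range_spec : Claim_equal_intersect_range := by
  intro b1 b2 _
  unfold Spec_intersect_range intersect_range intersect_range_alt
  rw [pvLoopX_eq]
  have hne : ∀ a b : Int, (PySem.List.pyRange a b 1 ≠ []) ↔ a < b := by
    intro a b
    constructor
    · intro h
      by_contra hb
      exact h (by simp [PySem.List.pyRange_one]; omega)
    · intro h
      rw [PySem.List.pyRange_one_cons h]
      simp
  simp only [hne]
  split_ifs with h <;> simp_all
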